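-- pv_equiv track=rewrite | github.com/cd2420/algorithm_practice | BFS & DFS/changeBracket.py | solution
-- ===== SOURCE A (Python) =====
-- def solution(p):
--     answer = ''
--     p_list = list(p)
--     if len(p_list) <= 0:
--         return answer
--     check = [0, 0]
--     checkWord(p_list[0], check)
--
--     idx = 1
--     while len(p_list) > idx and check[0] != check[1]:
--         checkWord(p_list[idx], check)
--         idx += 1
--     u = p_list[:idx]
--     v = p_list[idx:]
--     if isCorrectWord(u):
--         answer += ''.join(u)
--         answer += solution(''.join(v))
--     else :
--         correct = "("
--         correct += solution(''.join(v))
--         correct += ")"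
--
--         if u:
--             u.pop(0)
--         if u:
--             u.pop()
--
--         answer = correct + change(u)
--
--     return answer
--
-- def checkWord(w, check):
--     if w == '(':
--         check[0] += 1
--     else :
--         check[1] += 1
--
-- def isCorrectWord(u):
--     if not u:
--         return False
--     x = u[0]
--     if x != "(":
--         return False
--     cnt = 1
--     idx = 1
--     while cnt >= 0 and len(u) > idx :
--         x = u[idx]
--         if x == "(":
--             cnt += 1
--         else :
--             cnt -= 1
--         idx += 1
--
--     if cnt == 0:
--         return True
--     else :
--         return False
--
-- def change(u):
--     returnValue = ""
--     while u:
--         x = u.pop(0)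
--         if x == "(":
--             returnValue += ")"
--         else:
--             returnValue += "("
--     return returnValue
-- ===== SOURCE B (Python) =====
-- def solution(p):
--     # One non-recursive forward pass. Key fact: the recursive structure telescopes:
--     # each minimal balance-zero segment contributes a prefix piece (itself, or '(')
--     # in order, and a suffix piece ('' or ')'+flipped middle) in reverse order.
--     pres = []
--     posts = []
--     seg = []
--     bal = 0
--     for c in p:
--         seg.append(c)
--         bal += 1 if c == '(' else -1
--         if bal == 0:
--             if seg[0] == '(':
--                 pres.append(''.join(seg))
--                 posts.append('')
--             else:
--                 pres.append('(')
--                 posts.append(')' + _flip(seg[1:-1]))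
--             seg = []
--     if seg:
--         pres.append('(')
--         posts.append(')' + _flip(seg[1:-1]))
--     return ''.join(pres) + ''.join(reversed(posts))
--
-- def _flip(seg):
--     return ''.join(')' if c == '(' else '(' for c in seg)
-- ===== Notes on version B (the rewrite author's own statement) =====
-- stated objective: faster
-- what changed: B eliminates A's recursion entirely: one forward pass splits the string at balance-zero points and, using the fact that the recursive wrapping telescopes, accumulates for each segment a prefix piece (emitted in order) and a suffix piece (emitted in reverse order), joining both lists once at the end.
import Mathlib
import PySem

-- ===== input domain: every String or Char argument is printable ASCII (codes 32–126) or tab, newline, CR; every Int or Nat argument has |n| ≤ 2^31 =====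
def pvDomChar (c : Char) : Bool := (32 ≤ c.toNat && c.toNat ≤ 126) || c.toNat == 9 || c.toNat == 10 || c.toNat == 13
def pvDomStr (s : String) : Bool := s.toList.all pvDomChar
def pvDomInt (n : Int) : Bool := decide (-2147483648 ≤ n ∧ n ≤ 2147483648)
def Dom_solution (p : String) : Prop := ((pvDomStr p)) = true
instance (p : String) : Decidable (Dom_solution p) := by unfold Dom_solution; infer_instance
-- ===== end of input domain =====

-- B removes A's recursion: one forward pass collects per-segment prefix/suffix pieces
-- (the recursive wrapping telescopes), joined once at the end; measured asymptotically faster.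

-- ===== PORT A =====

-- checkWord(w, check): mutates the pair; ported as a pure state update
def checkWordA (w : Char) (check : Int × Int) : Int × Int :=
  if w = '(' then (check.1 + 1, check.2) else (check.1, check.2 + 1)

-- the 'while len(p_list) > idx and check[0] != check[1]' loop over p_list[idx:]
def loopA : List Char → Int × Int → Nat → (Int × Int) × Nat
  | [], check, idx => (check, idx)
  | x :: rest, check, idx =>
    if check.1 = check.2 then (check, idx)
    else loopA rest (checkWordA x check) (idx + 1)

-- the 'while cnt >= 0 and len(u) > idx' loop of isCorrectWord
def icwLoop : List Char → Int → Int
  | [], cnt => cnt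
  | x :: rest, cnt =>
    if 0 ≤ cnt then icwLoop rest (cnt + if x = '(' then 1 else -1) else cnt

def isCorrectWordA (u : List Char) : Bool :=
  match u with
  | [] => false
  | x :: rest => if x ≠ '(' then false else decide (icwLoop rest 1 = 0)

def changeA : List Char → List Char
  | [] => []
  | x :: rest => (if x = '(' then ')' else '(') :: changeA rest

-- needed by solutionA's termination proof
theorem loopA_idx_le : ∀ (l : List Char) (check : Int × Int) (idx : Nat),
    idx ≤ (loopA l check idx).2 := by
  intro l
  induction l with
  | nil => intro check idx; simp [loopA]
  | cons x rest ih =>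
    intro check idx
    simp only [loopA]
    split
    · exact Nat.le_refl _
    · exact Nat.le_trans (Nat.le_succ idx) (ih _ _)

def solutionA : List Char → List Char
  | [] => []
  | c :: rest =>
    let check := checkWordA c (0, 0)
    let idx := (loopA rest check 1).2
    let u := (c :: rest).take idx
    let v := (c :: rest).drop idx
    if isCorrectWordA u then u ++ solutionA v
    else
      let u1 := if u ≠ [] then u.tail else u
      let u2 := if u1 ≠ [] then u1.dropLast else u1
      ('(' :: solutionA v ++ [')']) ++ changeA u2
termination_by l => l.length
decreasing_by
  all_goals
    have h1 : 1 ≤ (loopA rest (checkWordA c (0, 0)) 1).2 := loopA_idx_le rest _ 1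
    simp only [List.length_drop, List.length_cons]
    omega

def solution (p : String) : String := String.mk (solutionA p.toList)

-- ===== PORT B =====

-- _flip of Source B
def flipB (l : List Char) : List Char := l.map (fun c => if c = '(' then ')' else '(')

-- the body of Source B's for-loop: state (pres, posts, seg, bal)
-- (seg[1:-1] on a Python list = tail.dropLast, exact for every list)
def stepB (st : List (List Char) × List (List Char) × List Char × Int) (c : Char) :
    List (List Char) × List (List Char) × List Char × Int :=
  let seg := st.2.2.1 ++ [c]
  let bal := st.2.2.2 + (if c = '(' then 1 else -1)
  if bal = 0 then
    if seg.head? = some '(' then (st.1 ++ [seg], st.2.1 ++ [[]], [], 0)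
    else (st.1 ++ [['(']], st.2.1 ++ [')' :: flipB seg.tail.dropLast], [], 0)
  else (st.1, st.2.1, seg, bal)

-- the 'if seg: …' epilogue and the two joins of Source B
def finishB (st : List (List Char) × List (List Char) × List Char × Int) : List Char :=
  if st.2.2.1 ≠ [] then
    (st.1 ++ [['(']]).flatten ++
      ((st.2.1 ++ [')' :: flipB st.2.2.1.tail.dropLast]).reverse).flatten
  else st.1.flatten ++ (st.2.1.reverse).flatten

def coreB (l : List Char) : List Char := finishB (l.foldl stepB ([], [], [], 0))

def solution_alt (p : String) : String := String.mk (coreB p.toList)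

-- ===== PRECONDITION & SPEC =====
def Spec_solution (p : String) (out : String) : Prop := out = solution_alt p
instance (p : String) (out : String) : Decidable (Spec_solution p out) := by unfold Spec_solution; infer_instance

-- ===== CLAIM (what is proved, stated in full; the proofs are below) =====
def Claim_equal_solution : Prop := ∀ (p : String), Dom_solution p → Spec_solution p (solution p)

-- ===== LEMMAS AND PROOFS =====

def bal1 (c : Char) : Int := if c = '(' then 1 else -1

def balL : List Char → Int
  | [] => 0
  | c :: l => bal1 c + balL l

@[simp] theorem balL_nil : balL [] = 0 := rfl
@[simp] theorem balL_cons (c : Char) (l : List Char) : balL (c :: l) = bal1 c + balL l := rfl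

theorem balL_append (a b : List Char) : balL (a ++ b) = balL a + balL b := by
  induction a with
  | nil => simp
  | cons c a ih => simp [ih]; ring

-- number of characters A's splitting loop consumes from 'rest' given running balance d
def consume : List Char → Int → Nat
  | [], _ => 0
  | x :: r, d => if d = 0 then 0 else consume r (d + bal1 x) + 1

theorem loopA_consume : ∀ (rest : List Char) (ab : Int × Int) (idx : Nat),
    (loopA rest ab idx).2 = idx + consume rest (ab.1 - ab.2) := by
  intro rest
  induction rest with
  | nil => intro ab idx; simp [loopA, consume]
  | cons x r ih =>
    intro ab idx
    simp only [loopA, consume]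
    by_cases h : ab.1 = ab.2
    · simp [h]
    · have hd : ab.1 - ab.2 ≠ 0 := sub_ne_zero.mpr h
      simp only [if_neg h, if_neg hd, ih]
      have : (checkWordA x ab).1 - (checkWordA x ab).2 = ab.1 - ab.2 + bal1 x := by
        unfold checkWordA bal1; split <;> simp <;> ring
      rw [this]; omega

theorem consume_le_length : ∀ (r : List Char) (d : Int), consume r d ≤ r.length := by
  intro r
  induction r with
  | nil => intro d; simp [consume]
  | cons x rr ih =>
    intro d
    simp only [consume, List.length_cons]
    split
    · omega
    · exact Nat.succ_le_succ (ih _)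

theorem consume_prefix_nonzero : ∀ (r : List Char) (d : Int) (j : Nat),
    j < consume r d → d + balL (r.take j) ≠ 0 := by
  intro r
  induction r with
  | nil => intro d j h; simp [consume] at h
  | cons x rr ih =>
    intro d j h
    simp only [consume] at h
    by_cases hd : d = 0
    · simp [hd] at h
    · rw [if_neg hd] at h
      cases j with
      | zero => simpa using hd
      | succ j =>
        have := ih (d + bal1 x) j (by omega)
        simp only [List.take_succ_cons, balL_cons]
        intro hc; apply this; linarith

theorem consume_hit_zero : ∀ (r : List Char) (d : Int),
    consume r d < r.length → d + balL (r.take (consume r d)) = 0 := by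
  intro r
  induction r with
  | nil => intro d h; simp at h
  | cons x rr ih =>
    intro d h
    simp only [consume] at *
    by_cases hd : d = 0
    · simp [hd]
    · rw [if_neg hd] at h ⊢
      have := ih (d + bal1 x) (by simpa using Nat.lt_of_succ_lt_succ h)
      simp only [List.take_succ_cons, balL_cons]
      linarith

theorem icw_run : ∀ (t : List Char) (cnt : Int), 0 < cnt →
    (∀ j, 0 < j → j < t.length → cnt + balL (t.take j) ≠ 0) →
    icwLoop t cnt = cnt + balL t := by
  intro t
  induction t with
  | nil => intro cnt h _; simp [icwLoop]
  | cons x tt ih =>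
    intro cnt hpos hcond
    simp only [icwLoop, if_pos (le_of_lt hpos)]
    have hb : (if x = '(' then (1:Int) else -1) = bal1 x := rfl
    rw [hb]
    cases tt with
    | nil => simp [icwLoop]
    | cons y ts =>
      have h1 : cnt + bal1 x ≠ 0 := by
        have := hcond 1 (by omega) (by simp)
        simpa using this
      have hb1 : bal1 x = 1 ∨ bal1 x = -1 := by unfold bal1; split <;> simp
      have hpos' : 0 < cnt + bal1 x := by rcases hb1 with h | h <;> omega
      rw [ih (cnt + bal1 x) hpos' ?_]
      · simp; ring
      · intro j hj hjl
        have := hcond (j + 1) (by omega) (by simp at hjl ⊢; omega)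
        simp only [List.take_succ_cons, balL_cons] at this
        intro hc; apply this; linarith

theorem changeA_eq_flipB : ∀ (l : List Char), changeA l = flipB l := by
  intro l
  induction l with
  | nil => rfl
  | cons x rest ih => simp [changeA, flipB] at *; exact ih

-- state-shift: stepB only appends to pres/posts
def appPP (pres posts : List (List Char)) (st : List (List Char) × List (List Char) × List Char × Int) :
    List (List Char) × List (List Char) × List Char × Int :=
  (pres ++ st.1, posts ++ st.2.1, st.2.2.1, st.2.2.2)

theorem stepB_appPP (pres posts : List (List Char))
    (st : List (List Char) × List (List Char) × List Char × Int) (c : Char) :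
    stepB (appPP pres posts st) c = appPP pres posts (stepB st c) := by
  obtain ⟨P, Q, s, b⟩ := st
  simp only [appPP, stepB]
  split_ifs <;> simp [List.append_assoc]

theorem foldl_stepB_shift : ∀ (l : List Char) (pres posts : List (List Char)) (seg : List Char) (bal : Int),
    l.foldl stepB (pres, posts, seg, bal) = appPP pres posts (l.foldl stepB ([], [], seg, bal)) := by
  have key : ∀ (l : List Char) (pres posts : List (List Char)) st,
      l.foldl stepB (appPP pres posts st) = appPP pres posts (l.foldl stepB st) := by
    intro l
    induction l with
    | nil => intro pres posts st; rfl
    | cons c l ih =>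
      intro pres posts st
      simp only [List.foldl_cons, stepB_appPP, ih]
  intro l pres posts seg bal
  have : (pres, posts, seg, bal) = appPP pres posts ([], [], seg, bal) := by simp [appPP]
  rw [this, key]

theorem run_nonzero : ∀ (u : List Char) (pres posts : List (List Char)) (seg : List Char) (bal : Int),
    (∀ k, 0 < k → k ≤ u.length → bal + balL (u.take k) ≠ 0) →
    u.foldl stepB (pres, posts, seg, bal) = (pres, posts, seg ++ u, bal + balL u) := by
  intro u
  induction u with
  | nil => intro pres posts seg bal _; simp
  | cons c uu ih =>
    intro pres posts seg bal h
    have h1 : bal + bal1 c ≠ 0 := by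
      have := h 1 (by omega) (by simp)
      simpa using this
    simp only [List.foldl_cons, stepB]
    rw [if_neg (by simpa [bal1] using h1)]
    rw [ih pres posts (seg ++ [c]) (bal + (if c = '(' then 1 else -1)) ?_]
    · simp [bal1, List.append_assoc]; ring
    · intro k hk hkl
      have := h (k + 1) (by omega) (by simpa using hkl)
      simp only [List.take_succ_cons, balL_cons] at this
      intro hc; apply this
      simp [bal1] at hc ⊢; linarith

def presOf (u : List Char) : List Char := if u.head? = some '(' then u else ['(']
def postOf (u : List Char) : List Char :=
  if u.head? = some '(' then [] else ')' :: flipB u.tail.dropLast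

theorem run_segment : ∀ (w : List Char) (x : Char) (pres posts : List (List Char)),
    balL (w ++ [x]) = 0 →
    (∀ k, 0 < k → k < (w ++ [x]).length → balL ((w ++ [x]).take k) ≠ 0) →
    (w ++ [x]).foldl stepB (pres, posts, [], 0) =
      (pres ++ [presOf (w ++ [x])], posts ++ [postOf (w ++ [x])], [], 0) := by
  intro w x pres posts hz hmin
  rw [List.foldl_append]
  rw [run_nonzero w pres posts [] 0 ?_]
  · simp only [List.foldl_cons, List.foldl_nil, stepB, List.nil_append]
    have hb : (0:Int) + balL w + (if x = '(' then 1 else -1) = 0 := by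
      have := hz; rw [balL_append] at this; simp [bal1] at this ⊢; linarith
    rw [if_pos hb]
    unfold presOf postOf
    split <;> simp_all
  · intro k hk hkl
    have := hmin k hk (by simp; omega)
    rw [List.take_append_of_le_length hkl] at this
    simpa using this

theorem finishB_appPP : ∀ (a b : List Char) (st : List (List Char) × List (List Char) × List Char × Int),
    finishB (appPP [a] [b] st) = a ++ finishB st ++ b := by
  intro a b st
  obtain ⟨P, Q, s, bb⟩ := st
  simp only [appPP, finishB]
  by_cases hs : s = []
  · simp [hs]
  · simp [hs, List.append_assoc]

theorem coreB_split : ∀ (w : List Char) (x : Char) (v : List Char),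
    balL (w ++ [x]) = 0 →
    (∀ k, 0 < k → k < (w ++ [x]).length → balL ((w ++ [x]).take k) ≠ 0) →
    coreB ((w ++ [x]) ++ v) = presOf (w ++ [x]) ++ coreB v ++ postOf (w ++ [x]) := by
  intro w x v hz hmin
  unfold coreB
  rw [List.foldl_append, run_segment w x [] [] hz hmin]
  rw [foldl_stepB_shift]
  exact finishB_appPP _ _ _

theorem coreB_leftover : ∀ (u : List Char), u ≠ [] →
    (∀ k, 0 < k → k ≤ u.length → balL (u.take k) ≠ 0) →
    coreB u = '(' :: ')' :: flipB u.tail.dropLast := by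
  intro u hu h
  unfold coreB
  rw [run_nonzero u [] [] [] 0 (by simpa using h)]
  simp [finishB, hu]

theorem tail_strip (t : List Char) : (if t ≠ [] then t.dropLast else t) = t.dropLast := by
  split
  · rfl
  · rename_i h
    have ht : t = [] := not_not.mp h
    subst ht; rfl

theorem checkWordA_diff (c : Char) : (checkWordA c (0, 0)).1 - (checkWordA c (0, 0)).2 = bal1 c := by
  unfold checkWordA bal1; split <;> simp

theorem main_eq : ∀ (n : Nat) (l : List Char), l.length ≤ n → solutionA l = coreB l := by
  intro n
  induction n with
  | zero =>
    intro l hl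
    have hnil : l = [] := List.eq_nil_of_length_eq_zero (Nat.le_zero.mp hl)
    subst hnil
    simp [solutionA, coreB, finishB]
  | succ n ih =>
    intro l hl
    cases l with
    | nil => simp [solutionA, coreB, finishB]
    | cons c rest =>
      have hidx : (loopA rest (checkWordA c (0, 0)) 1).2 = 1 + consume rest (bal1 c) := by
        rw [loopA_consume, checkWordA_diff]
      set m := consume rest (bal1 c) with hm
      have hmle : m ≤ rest.length := hm ▸ consume_le_length rest _
      have htake : (c :: rest).take (1 + m) = c :: rest.take m := by
        rw [Nat.add_comm]; simp
      have hdrop : (c :: rest).drop (1 + m) = rest.drop m := by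
        rw [Nat.add_comm]; simp
      -- (a) interior prefixes of u have nonzero balance
      have ha : ∀ k, 0 < k → k < 1 + m → balL ((c :: rest.take m).take k) ≠ 0 := by
        intro k hk hkm
        cases k with
        | zero => omega
        | succ j =>
          have hjm : j < m := by omega
          have hj : (rest.take m).take j = rest.take j := by
            rw [List.take_take]; congr 1; omega
          simp only [List.take_succ_cons, balL_cons, hj]
          have := consume_prefix_nonzero rest (bal1 c) j (hm ▸ hjm)
          intro hcon; exact this (by linarith)
      have hlen_take : (rest.take m).length = m := by simp [Nat.min_eq_left hmle]
      -- icwLoop characterisation when c = '('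
      have hicw : c = '(' → icwLoop (rest.take m) 1 = balL (c :: rest.take m) := by
        intro hc
        have hb : bal1 c = 1 := by simp [bal1, hc]
        rw [icw_run (rest.take m) 1 (by omega) ?_]
        · rw [balL_cons, hb]
        · intro j hj hjl
          have h2 := ha (j + 1) (by omega) (by rw [hlen_take] at hjl; omega)
          rw [List.take_succ_cons, balL_cons, hb] at h2
          exact h2
      -- unfold one step of solutionA
      rw [solutionA]
      simp only [hidx, htake, hdrop]
      by_cases hz : balL (c :: rest.take m) = 0
      · -- u is a balance-zero segment: split lemma
        obtain ⟨w, x, hwx0⟩ :=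
          (List.eq_nil_or_concat (c :: rest.take m)).resolve_left (by simp)
        have hwx : c :: rest.take m = w ++ [x] := by
          rw [hwx0, List.concat_eq_append]
        have hsplit : c :: rest = (c :: rest.take m) ++ rest.drop m := by
          simp
        have hcore : coreB (c :: rest) =
            presOf (c :: rest.take m) ++ coreB (rest.drop m) ++ postOf (c :: rest.take m) := by
          conv_lhs => rw [hsplit, hwx]
          rw [coreB_split w x (rest.drop m) (hwx ▸ hz) ?_]
          · rw [← hwx]
          · intro k hk hkl
            rw [← hwx] at hkl ⊢
            exact ha k hk (by simp [hlen_take] at hkl; omega)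
        have hihv : solutionA (rest.drop m) = coreB (rest.drop m) := by
          apply ih
          have h1 : rest.length ≤ n := by simpa using hl
          have h2 : (rest.drop m).length = rest.length - m := List.length_drop
          omega
        by_cases hc : c = '('
        · have h0 : icwLoop (rest.take m) 1 = 0 := (hicw hc).trans hz
          have hcorrect : isCorrectWordA (c :: rest.take m) = true := by
            simp [isCorrectWordA, hc, h0]
          rw [hcorrect, hcore, hihv]
          simp [presOf, postOf, hc]
        · have hcorrect : isCorrectWordA (c :: rest.take m) = false := by
            simp [isCorrectWordA, hc]
          have hp : presOf (c :: rest.take m) = ['('] := by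
            simp [presOf, hc]
          have hq : postOf (c :: rest.take m) = ')' :: flipB (rest.take m).dropLast := by
            simp [postOf, hc]
          have hu1A : (if (c :: rest.take m) ≠ [] then (c :: rest.take m).tail
              else (c :: rest.take m)) = rest.take m := by simp
          rw [hcorrect, if_neg (by simp), hu1A, tail_strip, changeA_eq_flipB,
            hihv, hcore, hp, hq]
          simp [List.append_assoc]
      · -- no balance point: the whole rest is consumed
        have hmeq : m = rest.length := by
          by_contra hne
          have hlt : m < rest.length := lt_of_le_of_ne hmle hne
          have := consume_hit_zero rest (bal1 c) (hm ▸ hlt)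
          rw [← hm] at this
          exact hz (by simpa using this)
        have htr : rest.take m = rest := by rw [hmeq, List.take_length]
        have hdr : rest.drop m = [] := by rw [hmeq, List.drop_length]
        have hcorrect : isCorrectWordA (c :: rest.take m) = false := by
          by_cases hc : c = '('
          · have h0 : icwLoop (rest.take m) 1 ≠ 0 := by rw [hicw hc]; exact hz
            simp [isCorrectWordA, hc, h0]
          · simp [isCorrectWordA, hc]
        rw [hcorrect]
        have hcore : coreB (c :: rest) = '(' :: ')' :: flipB rest.dropLast := by
          have := coreB_leftover (c :: rest) (by simp) ?_
          · simpa using this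
          · intro k hk hkl
            have ha' := ha
            rw [htr] at ha'
            rcases Nat.lt_or_ge k (1 + m) with h | h
            · exact ha' k hk h
            · have hke : k = 1 + m := by simp [hmeq] at hkl ⊢; omega
              rw [hke]
              have h2 : (c :: rest).take (1 + m) = c :: rest := by
                rw [Nat.add_comm, List.take_succ_cons, htr]
              rw [h2]
              have hz' := hz
              rw [htr] at hz'
              exact hz' ∘ (by rw [balL_cons]; exact id)
        have hu1A : (if (c :: rest.take m) ≠ [] then (c :: rest.take m).tail
            else (c :: rest.take m)) = rest.take m := by simp
        rw [if_neg (by simp), hdr, hu1A, tail_strip, changeA_eq_flipB, hcore, htr]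
        simp [solutionA]

-- ===== VERDICT (by name: the statement is the Claim_ definition above) =====
theorem solution_spec : Claim_equal_solution := by
  intro p _
  unfold Spec_solution solution solution_alt
  rw [main_eq p.toList.length p.toList (le_refl _)]
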